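-- pv_equiv track=rewrite | github.com/nishantsharma/xml.ai | hier2hier/models/nodeInfoPropagator.py | computeFanoutOrder
-- ===== SOURCE A (Python) =====
-- def computeFanoutOrder(treeIndex2NodeIndex2NbrIndices):
--     # For efficiency, we need to order nodes in the decreasing order of fanout.
--     flatIndicesWithFanout = []
--     flatIndex = 0
--     for _, nodeIndex2NbrIndices in treeIndex2NodeIndex2NbrIndices.items():
--         for _, (_, childIndices) in nodeIndex2NbrIndices.items():
--             flatIndicesWithFanout.append((flatIndex, len(childIndices)))
--             flatIndex += 1
--     flatIndicesWithFanout.sort(key=lambda t: -t[1])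
--
--     # Compute the permutation to use.
--     flatIndicesByDecreasingFanout = [ flatIndex for (flatIndex, _) in flatIndicesWithFanout ]
--     decreasingFanouts = [ fanout for (_, fanout) in flatIndicesWithFanout ]
--     return flatIndicesByDecreasingFanout, decreasingFanouts
-- ===== SOURCE B (Python) =====
-- def computeFanoutOrder(treeIndex2NodeIndex2NbrIndices):
--     # One-pass bucketing: fanout -> list of flatIndices (ascending), then emit buckets by descending fanout.
--     buckets = {}
--     flatIndex = 0
--     for _, nodeIndex2NbrIndices in treeIndex2NodeIndex2NbrIndices.items():
--         for _, (_, childIndices) in nodeIndex2NbrIndices.items():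
--             buckets.setdefault(len(childIndices), []).append(flatIndex)
--             flatIndex += 1
--     flatIndicesByDecreasingFanout = []
--     decreasingFanouts = []
--     for fanout in sorted(buckets, reverse=True):
--         idxs = buckets[fanout]
--         flatIndicesByDecreasingFanout.extend(idxs)
--         decreasingFanouts.extend([fanout] * len(idxs))
--     return flatIndicesByDecreasingFanout, decreasingFanouts
-- ===== Notes on version B (the rewrite author's own statement) =====
-- stated objective: alternative
-- what changed: Replaces the comparison sort of (index, fanout) pairs by one-pass bucketing into a dict fanout -> indices, then emits buckets by descending sorted distinct fanout; stability comes for free from ascending insertion into buckets.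
import Mathlib
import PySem

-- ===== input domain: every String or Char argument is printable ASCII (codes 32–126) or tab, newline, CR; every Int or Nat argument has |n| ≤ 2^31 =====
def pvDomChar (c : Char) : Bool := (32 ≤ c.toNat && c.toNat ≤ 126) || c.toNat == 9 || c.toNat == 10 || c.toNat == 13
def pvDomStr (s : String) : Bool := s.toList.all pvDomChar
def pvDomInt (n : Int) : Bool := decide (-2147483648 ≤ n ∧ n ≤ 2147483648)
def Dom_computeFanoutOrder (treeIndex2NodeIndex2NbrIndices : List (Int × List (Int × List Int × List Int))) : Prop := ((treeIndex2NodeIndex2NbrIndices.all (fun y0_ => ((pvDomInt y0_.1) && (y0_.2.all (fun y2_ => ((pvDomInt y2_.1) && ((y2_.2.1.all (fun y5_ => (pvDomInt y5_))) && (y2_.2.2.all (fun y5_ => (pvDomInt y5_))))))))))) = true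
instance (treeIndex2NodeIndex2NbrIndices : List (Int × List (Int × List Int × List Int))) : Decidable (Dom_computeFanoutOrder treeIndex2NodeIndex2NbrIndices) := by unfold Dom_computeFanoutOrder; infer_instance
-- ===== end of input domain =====

-- B replaces the comparison sort of (index, fanout) pairs by one-pass dict bucketing (fanout -> indices)
-- emitted in descending key order (objective: alternative algorithm, same return value).

-- ===== PORT A =====
def computeFanoutOrder (treeIndex2NodeIndex2NbrIndices : List (Int × List (Int × List Int × List Int))) : List Int × List Int :=
  -- flatIndicesWithFanout/flatIndex accumulator over the two nested .items() loops
  let st := treeIndex2NodeIndex2NbrIndices.foldl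
    (fun (st : List (Int × Int) × Int) t =>
      t.2.foldl (fun (st2 : List (Int × Int) × Int) nd =>
        (st2.1 ++ [(st2.2, (nd.2.2.length : Int))], st2.2 + 1)) st)
    ([], 0)
  -- .sort(key=lambda t: -t[1])
  let sortedPairs := PySem.List.sorted st.1 (fun t => -t.2) false
  (sortedPairs.map (fun t => t.1), sortedPairs.map (fun t => t.2))

-- ===== PORT B =====
def computeFanoutOrder_alt (treeIndex2NodeIndex2NbrIndices : List (Int × List (Int × List Int × List Int))) : List Int × List Int :=
  -- buckets.setdefault(len(childIndices), []).append(flatIndex)  =  modify with default []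
  let st := treeIndex2NodeIndex2NbrIndices.foldl
    (fun (st : PySem.Dict Int (List Int) × Int) t =>
      t.2.foldl (fun (st2 : PySem.Dict Int (List Int) × Int) nd =>
        (st2.1.modify (nd.2.2.length : Int) [] (fun l => l ++ [st2.2]), st2.2 + 1)) st)
    (PySem.Dict.empty, 0)
  let buckets := st.1
  -- for fanout in sorted(buckets, reverse=True): extend with the bucket and with [fanout] * len(idxs)
  (PySem.List.sorted buckets.keys (fun k => k) true).foldl
    (fun (acc : List Int × List Int) k =>
      let idxs := buckets.getD k []
      (acc.1 ++ idxs, acc.2 ++ PySem.List.pyRepeat [k] (idxs.length : Int)))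
    ([], [])

-- ===== PRECONDITION & SPEC =====
def Spec_computeFanoutOrder (treeIndex2NodeIndex2NbrIndices : List (Int × List (Int × List Int × List Int))) (out : List Int × List Int) : Prop := out = computeFanoutOrder_alt treeIndex2NodeIndex2NbrIndices
instance (treeIndex2NodeIndex2NbrIndices : List (Int × List (Int × List Int × List Int))) (out : List Int × List Int) : Decidable (Spec_computeFanoutOrder treeIndex2NodeIndex2NbrIndices out) := by unfold Spec_computeFanoutOrder; infer_instance

-- ===== CLAIM (what is proved, stated in full; the proofs are below) =====
def Claim_equal_computeFanoutOrder : Prop := ∀ (treeIndex2NodeIndex2NbrIndices : List (Int × List (Int × List Int × List Int))), Dom_computeFanoutOrder treeIndex2NodeIndex2NbrIndices → Spec_computeFanoutOrder treeIndex2NodeIndex2NbrIndices (computeFanoutOrder treeIndex2NodeIndex2NbrIndices)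

-- ===== LEMMAS AND PROOFS =====

-- the flattened fanout list, in flatIndex order
def fanList (xs : List (Int × List (Int × List Int × List Int))) : List Int :=
  xs.flatMap (fun t => t.2.map (fun nd => (nd.2.2.length : Int)))

-- pairs (flatIndex, fanout) starting at index i
def enumFrom : Int → List Int → List (Int × Int)
  | _, [] => []
  | i, f :: fs => (i, f) :: enumFrom (i + 1) fs

-- B's buckets emitted in key order K
def grouped (K : List Int) (ps : List (Int × Int)) : List (Int × Int) :=
  K.flatMap (fun k => ps.filter (fun p => p.2 == k))

-- insert a key into a strictly descending key list
def insD (k : Int) : List Int → List Int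
  | [] => [k]
  | j :: K => if k > j then k :: j :: K else if k = j then j :: K else j :: insD k K

-- ---- flattening: both nested loops produce / consume the pairs 'enumFrom i (fanList xs)' ----

lemma enumFrom_append (a : List Int) (i : Int) (b : List Int) :
    enumFrom i (a ++ b) = enumFrom i a ++ enumFrom (i + a.length) b := by
  induction a generalizing i with
  | nil => simp [enumFrom]
  | cons f fs ih => simp [enumFrom, ih (i + 1)]; ring_nf

lemma flattenA_inner (l : List (Int × List Int × List Int)) (acc : List (Int × Int)) (i : Int) :
    l.foldl (fun (st2 : List (Int × Int) × Int) nd =>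
        (st2.1 ++ [(st2.2, (nd.2.2.length : Int))], st2.2 + 1)) (acc, i)
      = (acc ++ enumFrom i (l.map (fun nd => (nd.2.2.length : Int))), i + l.length) := by
  induction l generalizing acc i with
  | nil => simp [enumFrom]
  | cons nd l ih => simp [List.foldl_cons, ih, enumFrom]; ring_nf

lemma flattenA (xs : List (Int × List (Int × List Int × List Int))) (acc : List (Int × Int)) (i : Int) :
    xs.foldl (fun (st : List (Int × Int) × Int) t =>
        t.2.foldl (fun (st2 : List (Int × Int) × Int) nd =>
          (st2.1 ++ [(st2.2, (nd.2.2.length : Int))], st2.2 + 1)) st) (acc, i)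
      = (acc ++ enumFrom i (fanList xs), i + (fanList xs).length) := by
  induction xs generalizing acc i with
  | nil => simp [fanList, enumFrom]
  | cons t xs ih =>
      simp only [List.foldl_cons, flattenA_inner, ih, fanList, List.flatMap_cons]
      rw [enumFrom_append]
      simp
      ring

def bstep (d : PySem.Dict Int (List Int)) (p : Int × Int) : PySem.Dict Int (List Int) :=
  d.modify p.1 [] (fun v => v ++ [p.2])

lemma flattenB_inner (l : List (Int × List Int × List Int)) (d : PySem.Dict Int (List Int)) (i : Int) :
    l.foldl (fun (st2 : PySem.Dict Int (List Int) × Int) nd =>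
        (st2.1.modify (nd.2.2.length : Int) [] (fun v => v ++ [st2.2]), st2.2 + 1)) (d, i)
      = (((enumFrom i (l.map (fun nd => (nd.2.2.length : Int)))).map (fun p => (p.2, p.1))).foldl bstep d,
         i + l.length) := by
  induction l generalizing d i with
  | nil => simp [enumFrom]
  | cons nd l ih => simp [List.foldl_cons, ih, enumFrom, bstep]; ring_nf

lemma flattenB (xs : List (Int × List (Int × List Int × List Int))) (d : PySem.Dict Int (List Int)) (i : Int) :
    xs.foldl (fun (st : PySem.Dict Int (List Int) × Int) t =>
        t.2.foldl (fun (st2 : PySem.Dict Int (List Int) × Int) nd =>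
          (st2.1.modify (nd.2.2.length : Int) [] (fun v => v ++ [st2.2]), st2.2 + 1)) st) (d, i)
      = (((enumFrom i (fanList xs)).map (fun p => (p.2, p.1))).foldl bstep d, i + (fanList xs).length) := by
  induction xs generalizing d i with
  | nil => simp [fanList, enumFrom]
  | cons t xs ih =>
      simp only [List.foldl_cons, flattenB_inner, ih, fanList, List.flatMap_cons]
      rw [enumFrom_append]
      simp [List.foldl_append]
      ring

-- ---- the dict built by B: buckets and keys ----

lemma bucketsB_getD (ps : List (Int × Int)) (k : Int) :
    ((ps.map (fun p => (p.2, p.1))).foldl bstep PySem.Dict.empty).getD k []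
      = (ps.filter (fun p => p.2 == k)).map (fun p => p.1) := by
  unfold bstep
  rw [PySem.Dict.getD_foldl_modify_append]
  simp [List.filter_map, Function.comp_def]

lemma bucketsB_keys (ps : List (Int × Int)) :
    ((ps.map (fun p => (p.2, p.1))).foldl bstep PySem.Dict.empty).keys
      = PySem.Set.ofList (ps.map (fun p => p.2)) := by
  unfold bstep
  rw [PySem.Dict.keys_foldl_modify_key (ps.map (fun p => (p.2, p.1)))
      (fun p => p.1) [] (fun _ p => fun v => v ++ [p.2]) PySem.Dict.empty]
  simp [PySem.Set.update_nil_left, List.map_map, Function.comp_def]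

-- ---- key-list facts ----

lemma mem_insD (m k : Int) (K : List Int) : m ∈ insD k K ↔ m = k ∨ m ∈ K := by
  induction K with
  | nil => simp [insD]
  | cons j K ih =>
      simp only [insD]
      split_ifs with h1 h2
      · simp
      · subst h2; simp
      · simp [ih]; tauto

lemma insD_pairwise (k : Int) (K : List Int) (h : K.Pairwise (· > ·)) :
    (insD k K).Pairwise (· > ·) := by
  induction K with
  | nil => simp [insD]
  | cons j K ih =>
      rw [List.pairwise_cons] at h
      simp only [insD]
      split_ifs with h1 h2
      · refine List.pairwise_cons.2 ⟨?_, List.pairwise_cons.2 ⟨h.1, h.2⟩⟩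
        intro m hm
        rcases List.mem_cons.1 hm with rfl | hm
        · exact h1
        · exact lt_trans (h.1 m hm) h1
      · exact List.pairwise_cons.2 ⟨h.1, h.2⟩
      · refine List.pairwise_cons.2 ⟨?_, ih h.2⟩
        intro m hm
        rcases (mem_insD m k K).1 hm with rfl | hm
        · omega
        · exact h.1 m hm

lemma insD_eq_of_mem (k : Int) (K : List Int) (hp : K.Pairwise (· > ·)) (hk : k ∈ K) :
    insD k K = K := by
  induction K with
  | nil => simp at hk
  | cons j K ih =>
      rw [List.pairwise_cons] at hp
      rcases List.mem_cons.1 hk with rfl | hk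
      · simp [insD]
      · have : k < j := hp.1 k hk
        simp only [insD]
        rw [if_neg (by omega), if_neg (by omega), ih hp.2 hk]

lemma insD_perm (k : Int) (K : List Int) (hk : k ∉ K) : (insD k K).Perm (K ++ [k]) := by
  induction K with
  | nil => simp [insD]
  | cons j K ih =>
      simp only [List.mem_cons, not_or] at hk
      simp only [insD]
      split_ifs with h1 h2
      · exact List.Perm.symm (List.perm_append_comm.trans (by simp))
      · exact absurd h2 hk.1
      · exact List.Perm.cons j (ih hk.2)

lemma sorted_desc_pairwise (S : List Int) (hnd : S.Nodup) :
    (PySem.List.sorted S (fun k => k) true).Pairwise (· > ·) := by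
  have h1 := PySem.List.sorted_pairwise_rev S (fun k => k)
  have h2 : (PySem.List.sorted S (fun k => k) true).Nodup :=
    ((PySem.List.sorted_perm S (fun k => k) true).nodup_iff).2 hnd
  exact (h1.and h2).imp (fun h => lt_of_le_of_ne h.1 (Ne.symm h.2))

lemma sorted_desc_add (S : List Int) (k : Int) (hnd : S.Nodup) :
    PySem.List.sorted (PySem.Set.add S k) (fun x => x) true
      = insD k (PySem.List.sorted S (fun x => x) true) := by
  have hperm := PySem.List.sorted_perm S (fun x => x) true
  have hpw := sorted_desc_pairwise S hnd
  by_cases hk : k ∈ S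
  · rw [PySem.Set.add_of_mem hk, insD_eq_of_mem k _ hpw ((PySem.List.mem_sorted S _ true k).2 hk)]
  · rw [PySem.Set.add_of_not_mem hk]
    refine PySem.List.sorted_rev_eq_of_perm_of_pairwise_gt _ _ _ ?_ ?_
    · exact (insD_perm k _ (fun h => hk ((PySem.List.mem_sorted S _ true k).1 h))).trans
        (hperm.append_right [k])
    · exact insD_pairwise k _ hpw

-- ---- grouped facts ----

lemma grouped_cons (j : Int) (K : List Int) (ps : List (Int × Int)) :
    grouped (j :: K) ps = ps.filter (fun p => p.2 == j) ++ grouped K ps := by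
  simp [grouped]

lemma grouped_append_not_mem (K : List Int) (ps : List (Int × Int)) (x : Int × Int)
    (hx : x.2 ∉ K) : grouped K (ps ++ [x]) = grouped K ps := by
  induction K with
  | nil => rfl
  | cons j K ih =>
      simp only [List.mem_cons, not_or] at hx
      rw [grouped_cons, grouped_cons, ih hx.2, List.filter_append]
      have : [x].filter (fun p => p.2 == j) = [] := by
        simp [hx.1]
      simp [this]

lemma insertBy_append_no_before (before : (Int × Int) → (Int × Int) → Bool) (x : Int × Int)
    (F l : List (Int × Int)) (h : ∀ y ∈ F, before x y = false) :
    PySem.List.insertBy before x (F ++ l) = F ++ PySem.List.insertBy before x l := by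
  induction F with
  | nil => rfl
  | cons y F ih =>
      have hy : before x y = false := h y (by simp)
      show (if before x y then _ else y :: PySem.List.insertBy before x (F ++ l)) = _
      rw [hy]
      simp only [Bool.false_eq_true, if_false, List.cons_append]
      rw [ih (fun z hz => h z (by simp [hz]))]

lemma insertBy_grouped_front (x : Int × Int) (K : List Int) (ps : List (Int × Int))
    (hlt : ∀ k ∈ K, k < x.2) :
    PySem.List.insertBy (fun a b => decide ((-a.2 : Int) < -b.2)) x (grouped K ps)
      = x :: grouped K ps := by
  rcases hG : grouped K ps with _ | ⟨h, t⟩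
  · rfl
  · have hmem : h ∈ grouped K ps := by rw [hG]; simp
    obtain ⟨k, hkK, hh⟩ := List.mem_flatMap.1 hmem
    have : h.2 = k := by
      have := List.of_mem_filter hh
      simpa using this
    have hk2 : h.2 < x.2 := this ▸ hlt k hkK
    show (if decide ((-x.2 : Int) < -h.2) then _ else _) = _
    rw [decide_eq_true (by omega)]
    simp

-- the bucket of every key of K is nonempty: needed so insertBy sees a representative
lemma ins_main (x : Int × Int) (K : List Int) (ps : List (Int × Int))
    (hpw : K.Pairwise (· > ·))
    (hne : ∀ k ∈ K, ∃ p ∈ ps, p.2 = k)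
    (hx : ps.filter (fun p => p.2 == x.2) = [] ∨ x.2 ∈ K) :
    PySem.List.insertBy (fun a b => decide ((-a.2 : Int) < -b.2)) x (grouped K ps)
      = grouped (insD x.2 K) (ps ++ [x]) := by
  induction K with
  | nil =>
      have hfil : ps.filter (fun p => p.2 == x.2) = [] := by
        rcases hx with h | h
        · exact h
        · simp at h
      show [x] = grouped [x.2] (ps ++ [x])
      rw [grouped_cons, List.filter_append, hfil]
      simp [grouped]
  | cons j K ih =>
      rw [List.pairwise_cons] at hpw
      have hKlt : ∀ k ∈ K, k < j := hpw.1
      rcases lt_trichotomy j x.2 with hj | hj | hj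
      · -- x.2 > j : x goes in front, into a fresh bucket
        have hnotin : x.2 ∉ j :: K := by
          simp only [List.mem_cons, not_or]
          exact ⟨by omega, fun h => by have := hKlt _ h; omega⟩
        have hfil : ps.filter (fun p => p.2 == x.2) = [] := by
          rcases hx with h | h
          · exact h
          · exact absurd h hnotin
        have hall : ∀ k ∈ j :: K, k < x.2 := by
          intro k hk
          rcases List.mem_cons.1 hk with rfl | hk
          · omega
          · have := hKlt _ hk; omega
        rw [insertBy_grouped_front x (j :: K) ps hall]
        simp only [insD, if_pos hj]
        have hR : grouped (x.2 :: j :: K) (ps ++ [x]) = [x] ++ grouped (j :: K) ps := by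
          rw [grouped_cons, grouped_append_not_mem _ _ _ hnotin, List.filter_append, hfil]
          simp
        rw [hR]
        simp
      · -- x.2 = j : x goes right after the j-bucket
        subst hj
        have hnotK : x.2 ∉ K := fun h => by have := hKlt _ h; omega
        rw [grouped_cons, insertBy_append_no_before _ _ _ _
          (fun y hy => by
            have : y.2 = x.2 := by simpa using List.of_mem_filter hy
            simp [this])]
        rw [insertBy_grouped_front x K ps (fun k hk => hKlt k hk)]
        rw [show insD x.2 (x.2 :: K) = x.2 :: K by simp [insD]]
        have hR : grouped (x.2 :: K) (ps ++ [x])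
            = ps.filter (fun p => p.2 == x.2) ++ [x] ++ grouped K ps := by
          rw [grouped_cons, grouped_append_not_mem K ps x hnotK, List.filter_append]
          simp
        rw [hR]
        simp
      · -- x.2 < j : skip the j-bucket, recurse
        have hxK : ps.filter (fun p => p.2 == x.2) = [] ∨ x.2 ∈ K := by
          rcases hx with h | h
          · exact Or.inl h
          · rcases List.mem_cons.1 h with rfl | h
            · omega
            · exact Or.inr h
        rw [grouped_cons, insertBy_append_no_before _ _ _ _
          (fun y hy => by
            have : y.2 = j := by simpa using List.of_mem_filter hy
            simp only [decide_eq_false_iff_not, not_lt, this]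
            omega)]
        rw [ih hpw.2 (fun k hk => hne k (by simp [hk])) hxK]
        rw [show insD x.2 (j :: K) = j :: insD x.2 K by
          simp only [insD]; rw [if_neg (by omega), if_neg (by omega)]]
        rw [grouped_cons (j := j), List.filter_append]
        have hone : [x].filter (fun p => p.2 == j) = [] := by
          simp only [List.filter_cons, List.filter_nil]
          rw [if_neg (by simp; omega)]
        simp [hone]

-- ---- the characterisation of A's stable sort ----

lemma sorted_grouped (ps : List (Int × Int)) :
    PySem.List.sorted ps (fun t => -t.2) false
      = grouped (PySem.List.sorted (PySem.Set.ofList (ps.map (fun p => p.2))) (fun k => k) true) ps := by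
  induction ps using List.reverseRecOn with
  | nil => rfl
  | append_singleton ps x ih =>
      have hfold : PySem.List.sorted (ps ++ [x]) (fun t : Int × Int => -t.2) false
          = PySem.List.insertBy (fun a b => decide ((-a.2 : Int) < -b.2)) x
              (PySem.List.sorted ps (fun t => -t.2) false) := by
        rw [PySem.List.sorted_eq_foldl_insertBy, PySem.List.sorted_eq_foldl_insertBy,
          List.foldl_append]
        rfl
      set K := PySem.List.sorted (PySem.Set.ofList (ps.map (fun p => p.2))) (fun k => k) true with hK
      have hpw : K.Pairwise (· > ·) :=
        sorted_desc_pairwise _ (PySem.Set.nodup_ofList _)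
      have hne : ∀ k ∈ K, ∃ p ∈ ps, p.2 = k := by
        intro k hk
        have : k ∈ ps.map (fun p => p.2) :=
          (PySem.Set.mem_ofList _ _).1 ((PySem.List.mem_sorted _ _ true k).1 hk)
        obtain ⟨p, hp, rfl⟩ := List.mem_map.1 this
        exact ⟨p, hp, rfl⟩
      have hx : ps.filter (fun p => p.2 == x.2) = [] ∨ x.2 ∈ K := by
        by_cases hmem : x.2 ∈ ps.map (fun p => p.2)
        · exact Or.inr ((PySem.List.mem_sorted _ _ true x.2).2 ((PySem.Set.mem_ofList _ _).2 hmem))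
        · refine Or.inl (List.filter_eq_nil_iff.2 ?_)
          intro p hp hpk
          exact hmem (List.mem_map.2 ⟨p, hp, by simpa using hpk⟩)
      rw [hfold, ih, ins_main x K ps hpw hne hx]
      congr 1
      rw [show List.map (fun p => p.2) (ps ++ [x]) = List.map (fun p => p.2) ps ++ [x.2] by simp]
      rw [PySem.Set.ofList_append_singleton, sorted_desc_add _ _ (PySem.Set.nodup_ofList _)]

-- ---- odds and ends for the final assembly ----

lemma filter_snd_replicate (ps : List (Int × Int)) (k : Int) :
    (ps.filter (fun p => p.2 == k)).map (fun p => p.2)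
      = List.replicate (ps.filter (fun p => p.2 == k)).length k := by
  induction ps with
  | nil => rfl
  | cons p ps ih =>
      by_cases h : p.2 = k
      · simp [h, ih, List.replicate_succ]
      · simp [h, ih]

theorem computeFanoutOrder_eq_alt (xs : List (Int × List (Int × List Int × List Int))) :
    computeFanoutOrder xs = computeFanoutOrder_alt xs := by
  simp only [computeFanoutOrder, computeFanoutOrder_alt]
  rw [flattenA xs [] 0, flattenB xs PySem.Dict.empty 0]
  simp only [List.nil_append]
  rw [bucketsB_keys, sorted_grouped]
  rw [PySem.List.foldl_prod_mk
    (f := fun a k => a ++ (((enumFrom 0 (fanList xs)).map (fun p => (p.2, p.1))).foldl bstep PySem.Dict.empty).getD k [])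
    (g := fun a k => a ++ PySem.List.pyRepeat [k]
      (((((enumFrom 0 (fanList xs)).map (fun p => (p.2, p.1))).foldl bstep PySem.Dict.empty).getD k []).length : Int))]
  rw [PySem.List.foldl_append_eq_flatMap, PySem.List.foldl_append_eq_flatMap]
  refine Prod.ext ?_ ?_
  · simp only [grouped, List.map_flatMap, bucketsB_getD, List.nil_append]
  · simp only [grouped, List.map_flatMap, bucketsB_getD, PySem.List.pyRepeat_singleton,
      List.length_map, Int.toNat_natCast, List.nil_append, filter_snd_replicate]


-- ===== VERDICT (by name: the statement is the Claim_ definition above) =====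
theorem computeFanoutOrder_spec : Claim_equal_computeFanoutOrder := by
  intro xs _
  exact computeFanoutOrder_eq_alt xs
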